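-- pv_equiv track=rewrite | github.com/denysmarakhovskyi/python-progs | just_progs.py | primes_sum
-- ===== SOURCE A (Python) =====
-- def primes_sum(lower, upper):
--     """Assume upper>=lower>2"""
--     primes = [2]
--     answer = 2
--     for num in range(lower, upper+1):
--         if any(num % p == 0 for p in primes):
--             continue # not a prime
--         elif num < 2:
--             continue
--
--         primes.append(num)
--
--         if '3' in str(num):
--             continue
--         answer += num
--
--     return answer
-- ===== SOURCE B (Python) =====
-- def primes_sum(lower, upper):
--     """Assume upper>=lower>2"""
--     lo = max(lower, 2)
--     composite = set()
--     answer = 2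
--     for n in range(lo, upper + 1):
--         if n % 2 == 0 or n in composite:
--             continue
--         if '3' not in str(n):
--             answer += n
--         composite.update(range(2 * n, upper + 1, n))
--     return answer
-- ===== Notes on version B (the rewrite author's own statement) =====
-- stated objective: alternative
-- what changed: Replaced trial division of each candidate against the growing list of found pseudo-primes by an incremental sieve that, on finding a pseudo-prime, marks its multiples up to upper in a set, so each candidate costs one parity test plus one set lookup.
import Mathlib
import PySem

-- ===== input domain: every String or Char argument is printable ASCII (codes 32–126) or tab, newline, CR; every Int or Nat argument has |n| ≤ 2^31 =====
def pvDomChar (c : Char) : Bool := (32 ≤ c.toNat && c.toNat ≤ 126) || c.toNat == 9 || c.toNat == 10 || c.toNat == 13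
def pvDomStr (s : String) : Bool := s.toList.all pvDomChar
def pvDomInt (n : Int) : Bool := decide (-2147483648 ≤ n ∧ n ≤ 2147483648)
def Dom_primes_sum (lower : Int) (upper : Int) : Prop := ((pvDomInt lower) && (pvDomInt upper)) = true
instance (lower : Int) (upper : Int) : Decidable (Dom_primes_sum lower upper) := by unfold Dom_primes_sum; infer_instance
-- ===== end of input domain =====

-- B replaces trial division against the list of found pseudo-primes by an incremental sieve
-- marking each found pseudo-prime's multiples in a set (a different algorithm; same exact result).


-- ===== PORT A =====
-- loop body of A: skip if divisible by a found "prime" or < 2, else record and maybe add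
def pvStepA (st : List Int × Int) (num : Int) : List Int × Int :=
  if st.1.any (fun p => PySem.Int.mod num p == 0) then st
  else if num < 2 then st
  else
    let primes := st.1 ++ [num]
    if (PySem.Int.toChars num).contains '3' then (primes, st.2)
    else (primes, st.2 + num)

def primes_sum (lower : Int) (upper : Int) : Int :=
  ((PySem.List.pyRange lower (upper + 1) 1).foldl pvStepA ([2], 2)).2

-- ===== PORT B =====
-- loop body of B: skip evens and sieved-out numbers; else maybe add, then mark multiples
def pvStepB (upper : Int) (st : PySem.Set Int × Int) (n : Int) : PySem.Set Int × Int :=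
  if PySem.Int.mod n 2 == 0 || PySem.Set.contains st.1 n then st
  else
    let answer := if !((PySem.Int.toChars n).contains '3') then st.2 + n else st.2
    (PySem.Set.update st.1 (PySem.List.pyRange (2 * n) (upper + 1) n), answer)

def primes_sum_alt (lower : Int) (upper : Int) : Int :=
  ((PySem.List.pyRange (max lower 2) (upper + 1) 1).foldl (pvStepB upper) (PySem.Set.empty, 2)).2

-- ===== PRECONDITION & SPEC =====
def Spec_primes_sum (lower : Int) (upper : Int) (out : Int) : Prop := out = primes_sum_alt lower upper
instance (lower : Int) (upper : Int) (out : Int) : Decidable (Spec_primes_sum lower upper out) := by unfold Spec_primes_sum; infer_instance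

-- ===== CLAIM (what is proved, stated in full; the proofs are below) =====
def Claim_equal_primes_sum : Prop := ∀ (lower : Int) (upper : Int), Dom_primes_sum lower upper → Spec_primes_sum lower upper (primes_sum lower upper)

-- ===== LEMMAS AND PROOFS =====

-- A's loop does nothing while num < 2 (evens are divisible by 2; odd num < 2 hits the num < 2 branch)
theorem pvPrefix (l : List Int) (hl : ∀ x ∈ l, x < 2) :
    l.foldl pvStepA ([2], 2) = ([2], 2) := by
  induction l with
  | nil => rfl
  | cons x l ih =>
    have hx : x < 2 := hl x (by simp)
    have hstep : pvStepA ([2], 2) x = ([2], 2) := by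
      unfold pvStepA
      split_ifs <;> rfl
    rw [List.foldl_cons, hstep]
    exact ih (fun y hy => hl y (by simp [hy]))

-- a positive proper divisor of a is at most half of a
theorem pvHalf {p a : Int} (hp : 0 < p) (hpa : p < a) (hd : p ∣ a) : 2 * p ≤ a := by
  obtain ⟨k, hk⟩ := hd
  have hk2 : 2 ≤ k := by nlinarith
  nlinarith

-- the parallel loop invariant: with P the pseudo-primes found so far (all in [2, a)) and C
-- exactly the marked multiples ≤ upper of members of P, both loops over [a, upper] agree
theorem pvLoop (upper : Int) (n : Nat) :
    ∀ (a : Int), (upper + 1 - a).toNat ≤ n → 2 ≤ a →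
    ∀ (P : List Int) (C : PySem.Set Int) (ans : Int),
      (∀ p ∈ P, 2 ≤ p ∧ p < a) →
      (∀ m : Int, m ∈ C ↔ ∃ p ∈ P, p ∣ m ∧ 2 * p ≤ m ∧ m ≤ upper) →
      ((PySem.List.pyRange a (upper + 1) 1).foldl pvStepA (2 :: P, ans)).2
        = ((PySem.List.pyRange a (upper + 1) 1).foldl (pvStepB upper) (C, ans)).2 := by
  induction n with
  | zero =>
    intro a hn ha P C ans hP hC
    have : upper + 1 ≤ a := by omega
    rw [PySem.List.pyRange_one_eq_nil this]
    rfl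
  | succ n ih =>
    intro a hn ha P C ans hP hC
    by_cases hend : upper + 1 ≤ a
    · rw [PySem.List.pyRange_one_eq_nil hend]
      rfl
    · have hau : a ≤ upper := by omega
      rw [PySem.List.pyRange_one_cons (by omega)]
      simp only [List.foldl_cons]
      -- the two skip conditions coincide
      have hcond : ((2 :: P).any (fun p => PySem.Int.mod a p == 0))
          = (PySem.Int.mod a 2 == 0 || PySem.Set.contains C a) := by
        simp only [List.any_cons]
        congr 1
        rw [Bool.eq_iff_iff, List.any_eq_true, PySem.Set.contains_iff, hC]
        constructor
        · rintro ⟨p, hpP, hpd⟩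
          have hdvd : p ∣ a := (PySem.Int.mod_eq_zero_iff_dvd a p).1 (by simpa using hpd)
          obtain ⟨hp2, hpa⟩ := hP p hpP
          exact ⟨p, hpP, hdvd, pvHalf (by omega) hpa hdvd, hau⟩
        · rintro ⟨p, hpP, hpd, _, _⟩
          exact ⟨p, hpP, by simpa using (PySem.Int.mod_eq_zero_iff_dvd a p).2 hpd⟩
      by_cases hskip : ((2 :: P).any (fun p => PySem.Int.mod a p == 0)) = true
      · -- both skip
        have hA : pvStepA (2 :: P, ans) a = (2 :: P, ans) := by
          unfold pvStepA; simp [hskip]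
        have hB : pvStepB upper (C, ans) a = (C, ans) := by
          unfold pvStepB; rw [← hcond]; simp [hskip]
        rw [hA, hB]
        exact ih (a + 1) (by omega) (by omega) P C ans
          (fun p hp => ⟨(hP p hp).1, by have := (hP p hp).2; omega⟩) hC
      · -- a is a new pseudo-prime in both
        have hA : pvStepA (2 :: P, ans) a
            = (2 :: (P ++ [a]), if (PySem.Int.toChars a).contains '3' then ans else ans + a) := by
          unfold pvStepA
          simp only [Bool.not_eq_true] at hskip
          rw [hskip]
          simp only [Bool.false_eq_true, if_false, if_neg (by omega : ¬ a < 2)]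
          split_ifs <;> simp_all
        have hB : pvStepB upper (C, ans) a
            = (PySem.Set.update C (PySem.List.pyRange (2 * a) (upper + 1) a),
               if (PySem.Int.toChars a).contains '3' then ans else ans + a) := by
          unfold pvStepB
          rw [← hcond]
          simp only [Bool.not_eq_true] at hskip
          rw [hskip]
          simp only [Bool.false_eq_true, if_false]
          split_ifs <;> simp_all
        rw [hA, hB]
        refine ih (a + 1) (by omega) (by omega) (P ++ [a]) _ _ ?_ ?_
        · intro p hp
          rcases List.mem_append.1 hp with h | h
          · exact ⟨(hP p h).1, by have := (hP p h).2; omega⟩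
          · simp only [List.mem_singleton] at h; omega
        · intro m
          rw [PySem.Set.mem_update, hC,
              PySem.List.mem_pyRange_iff_of_pos (by omega : (0:Int) < a) m]
          constructor
          · rintro (⟨p, hpP, h⟩ | ⟨h1, h2, h3⟩)
            · exact ⟨p, List.mem_append.2 (Or.inl hpP), h⟩
            · refine ⟨a, List.mem_append.2 (Or.inr (by simp)), ?_, h1, by omega⟩
              have : a ∣ m - 2 * a := h3
              have h4 : a ∣ 2 * a := ⟨2, by ring⟩
              have := dvd_add this h4
              simpa using this
          · rintro ⟨p, hpP, hd, h1, h2⟩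
            rcases List.mem_append.1 hpP with h | h
            · exact Or.inl ⟨p, h, hd, h1, h2⟩
            · simp only [List.mem_singleton] at h
              subst h
              exact Or.inr ⟨h1, by omega, by exact dvd_sub hd ⟨2, by ring⟩⟩

-- ===== VERDICT (by name: the statement is the Claim_ definition above) =====
theorem primes_sum_spec : Claim_equal_primes_sum := by
  intro lower upper _
  unfold Spec_primes_sum primes_sum primes_sum_alt
  have hCempty : ∀ m : Int, m ∈ (PySem.Set.empty : PySem.Set Int)
      ↔ ∃ p ∈ ([] : List Int), p ∣ m ∧ 2 * p ≤ m ∧ m ≤ upper := by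
    simp [PySem.Set.empty]
  by_cases hl : 2 ≤ lower
  · rw [max_eq_left hl]
    exact pvLoop upper (upper + 1 - lower).toNat lower le_rfl hl [] PySem.Set.empty 2
      (by simp) hCempty
  · rw [max_eq_right (by omega : lower ≤ 2)]
    by_cases hu : upper + 1 ≤ 2
    · rw [PySem.List.pyRange_one_eq_nil hu,
        pvPrefix _ (fun x hx => by
          have := (PySem.List.mem_pyRange_one.1 hx).2; omega)]
      rfl
    · rw [PySem.List.pyRange_one_append lower 2 (upper + 1) (by omega) (by omega),
        List.foldl_append,
        pvPrefix _ (fun x hx => by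
          have := (PySem.List.mem_pyRange_one.1 hx).2; omega)]
      exact pvLoop upper (upper + 1 - 2).toNat 2 le_rfl le_rfl [] PySem.Set.empty 2
        (by simp) hCempty
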